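-- pv_equiv track=rewrite | github.com/chrizandrcouture/text_ocr_inpainting | inpaint.py | get_max_bbox
-- ===== SOURCE A (Python) =====
-- X_PADDING = 10
--
-- Y_PADDING = 10
--
-- def get_max_bbox(bboxes, height, width):
--     xmins = [bboxes[x][0][0] for x in bboxes]
--     ymins = [bboxes[x][0][1] for x in bboxes]
--     xmaxes = [bboxes[x][1][0] for x in bboxes]
--     ymaxes = [bboxes[x][1][1] for x in bboxes]
--
--     xmin_all, ymin_all = max(min(xmins) - X_PADDING, 0), max(min(ymins) - Y_PADDING, 0)
--     xmax_all, ymax_all = min(max(xmaxes) + X_PADDING, width), min(max(ymaxes) + Y_PADDING, height)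
--
--     return xmin_all, ymin_all, xmax_all, ymax_all
-- ===== SOURCE B (Python) =====
-- X_PADDING = 10
--
-- Y_PADDING = 10
--
-- def get_max_bbox(bboxes, height, width):
--     keys = iter(bboxes)
--     b = bboxes[next(keys)]
--     xmin, ymin = b[0][0], b[0][1]
--     xmax, ymax = b[1][0], b[1][1]
--     for k in keys:
--         b = bboxes[k]
--         xmin = min(xmin, b[0][0])
--         ymin = min(ymin, b[0][1])
--         xmax = max(xmax, b[1][0])
--         ymax = max(ymax, b[1][1])
--     return max(xmin - X_PADDING, 0), max(ymin - Y_PADDING, 0), min(xmax + X_PADDING, width), min(ymax + Y_PADDING, height)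
-- ===== Notes on version B (the rewrite author's own statement) =====
-- stated objective: simpler
-- what changed: Replaces A's four list comprehensions plus four min/max passes with a single loop over the dict that maintains the four running extrema, seeded from the first entry.
import Mathlib
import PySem

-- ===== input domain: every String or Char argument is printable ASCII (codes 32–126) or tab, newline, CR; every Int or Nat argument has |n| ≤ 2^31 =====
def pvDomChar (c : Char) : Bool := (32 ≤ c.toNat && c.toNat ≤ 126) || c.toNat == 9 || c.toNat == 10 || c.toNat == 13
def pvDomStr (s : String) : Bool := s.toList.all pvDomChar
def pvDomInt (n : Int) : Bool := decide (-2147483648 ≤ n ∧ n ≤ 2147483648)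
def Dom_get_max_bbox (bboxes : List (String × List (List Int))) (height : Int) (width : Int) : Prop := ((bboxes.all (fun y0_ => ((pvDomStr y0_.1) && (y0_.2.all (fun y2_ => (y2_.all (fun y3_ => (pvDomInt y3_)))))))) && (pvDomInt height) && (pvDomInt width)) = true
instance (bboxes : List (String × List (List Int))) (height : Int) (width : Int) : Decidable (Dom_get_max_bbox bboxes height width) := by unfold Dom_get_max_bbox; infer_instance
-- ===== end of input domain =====

-- B replaces A's four comprehensions plus four min/max passes by one loop keeping four running extrema.

-- ===== PORT A =====
-- `bboxes[x]` for a key x iterated from the dict itself yields that entry's value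
-- (Pre_ keeps the keys distinct, so the assoc list faithfully represents the dict).
def get_max_bbox (bboxes : List (String × List (List Int))) (height : Int) (width : Int) : Int × Int × Int × Int :=
  let xmins := bboxes.map (fun kv => (PySem.List.pyGet? ((PySem.List.pyGet? kv.2 0).getD []) 0).getD 0)
  let ymins := bboxes.map (fun kv => (PySem.List.pyGet? ((PySem.List.pyGet? kv.2 0).getD []) 1).getD 0)
  let xmaxes := bboxes.map (fun kv => (PySem.List.pyGet? ((PySem.List.pyGet? kv.2 1).getD []) 0).getD 0)
  let ymaxes := bboxes.map (fun kv => (PySem.List.pyGet? ((PySem.List.pyGet? kv.2 1).getD []) 1).getD 0)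
  let xmin_all := max ((PySem.List.min? xmins (fun y => y)).getD 0 - 10) 0
  let ymin_all := max ((PySem.List.min? ymins (fun y => y)).getD 0 - 10) 0
  let xmax_all := min ((PySem.List.max? xmaxes (fun y => y)).getD 0 + 10) width
  let ymax_all := min ((PySem.List.max? ymaxes (fun y => y)).getD 0 + 10) height
  (xmin_all, ymin_all, xmax_all, ymax_all)

-- ===== PORT B =====
-- b[i][j] (in range wherever anything is claimed; the .getD defaults are only the totality fallback)
def pvCorner (v : List (List Int)) (i j : Int) : Int :=
  (PySem.List.pyGet? ((PySem.List.pyGet? v i).getD []) j).getD 0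

def get_max_bbox_alt (bboxes : List (String × List (List Int))) (height : Int) (width : Int) : Int × Int × Int × Int :=
  match bboxes with
  | [] => (0, 0, 0, 0)  -- B raises here (next on an empty iterator); excluded by Pre_
  | kv :: rest =>
    let s := rest.foldl
      (fun (acc : Int × Int × Int × Int) kv' =>
        (min acc.1 (pvCorner kv'.2 0 0), min acc.2.1 (pvCorner kv'.2 0 1),
         max acc.2.2.1 (pvCorner kv'.2 1 0), max acc.2.2.2 (pvCorner kv'.2 1 1)))
      (pvCorner kv.2 0 0, pvCorner kv.2 0 1, pvCorner kv.2 1 0, pvCorner kv.2 1 1)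
    (max (s.1 - 10) 0, max (s.2.1 - 10) 0, min (s.2.2.1 + 10) width, min (s.2.2.2 + 10) height)

-- ===== PRECONDITION & SPEC =====
-- Pre_ excludes: the empty dict (A's min([]) raises ValueError), entries whose value lacks two
-- points of two coordinates (A raises IndexError), and duplicate keys, on which the association
-- list does not faithfully represent a Python dict (later duplicates overwrite earlier ones).
def Pre_get_max_bbox (bboxes : List (String × List (List Int))) (height : Int) (width : Int) : Prop :=
  bboxes ≠ [] ∧ (bboxes.map Prod.fst).Nodup ∧
    ∀ kv ∈ bboxes, 2 ≤ kv.2.length ∧ ∀ p ∈ kv.2.take 2, 2 ≤ p.length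
instance (bboxes : List (String × List (List Int))) (height : Int) (width : Int) : Decidable (Pre_get_max_bbox bboxes height width) := by unfold Pre_get_max_bbox; infer_instance

def pvWitness_get_max_bbox : (List (String × List (List Int))) × Int × Int :=
  ([("a", [[1, 2], [3, 4]])], 100, 100)

def Spec_get_max_bbox (bboxes : List (String × List (List Int))) (height : Int) (width : Int) (out : Int × Int × Int × Int) : Prop := out = get_max_bbox_alt bboxes height width
instance (bboxes : List (String × List (List Int))) (height : Int) (width : Int) (out : Int × Int × Int × Int) : Decidable (Spec_get_max_bbox bboxes height width out) := by unfold Spec_get_max_bbox; infer_instance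

-- ===== CLAIM (what is proved, stated in full; the proofs are below) =====
def Claim_equal_get_max_bbox : Prop := ∀ (bboxes : List (String × List (List Int))) (height : Int) (width : Int), Dom_get_max_bbox bboxes height width → Pre_get_max_bbox bboxes height width → Spec_get_max_bbox bboxes height width (get_max_bbox bboxes height width)

-- ===== LEMMAS AND PROOFS =====

-- B's single four-accumulator loop equals four independent extrema loops.
lemma pvFold4 (l : List (String × List (List Int))) (a b c d : Int) :
    l.foldl (fun (acc : Int × Int × Int × Int) kv' =>
        (min acc.1 (pvCorner kv'.2 0 0), min acc.2.1 (pvCorner kv'.2 0 1),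
         max acc.2.2.1 (pvCorner kv'.2 1 0), max acc.2.2.2 (pvCorner kv'.2 1 1))) (a, b, c, d)
      = (l.foldl (fun x kv' => min x (pvCorner kv'.2 0 0)) a,
         l.foldl (fun x kv' => min x (pvCorner kv'.2 0 1)) b,
         l.foldl (fun x kv' => max x (pvCorner kv'.2 1 0)) c,
         l.foldl (fun x kv' => max x (pvCorner kv'.2 1 1)) d) := by
  induction l generalizing a b c d with
  | nil => rfl
  | cons kv t ih => simp only [List.foldl_cons, ih]

-- ===== VERDICT (by name: the statement is the Claim_ definition above) =====
theorem get_max_bbox_spec : Claim_equal_get_max_bbox := by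
  intro bboxes height width _ hpre
  obtain ⟨hne, -, -⟩ := hpre
  obtain ⟨kv, rest, rfl⟩ := List.exists_cons_of_ne_nil hne
  show _ = _
  simp only [get_max_bbox, get_max_bbox_alt, List.map_cons,
    PySem.List.min?_id_cons, PySem.List.max?_id_cons, Option.getD_some, List.foldl_map, pvFold4]
  simp [pvCorner]
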